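-- pv_equiv track=rewrite | github.com/biomos/gromos_tutorial_livecoms | review_process/initial_MS/tutorial_files/t_02/corrections/PLA2_ASA/dGpol/integrate.py | getpotentials
-- ===== SOURCE A (Python) =====
-- def getpotentials(file, scheme, CHARGES, NPBC_SLV, NPBC_VAC, PBC_SLV, PBC_VAC, FFT_LS, FFT_BM):
--   CHARGES_NEW = []
--   NPBC_SLV_NEW = []
--   NPBC_VAC_NEW = []
--   PBC_SLV_NEW = []
--   PBC_VAC_NEW = []
--   FFT_LS_NEW = []
--   FFT_BM_NEW = []
--
--   for line in file[1:]:
--     templine = line.split()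
--     if (len(templine) == 0): #for the case that the last line is empty
--       break
--     CHARGES_NEW.append(templine[3])
--     NPBC_SLV_NEW.append(templine[4])
--     NPBC_VAC_NEW.append(templine[5])
--     PBC_SLV_NEW.append(templine[6])
--     PBC_VAC_NEW.append(templine[7])
--     if (scheme == 'BM'):
--       FFT_LS_NEW.append(templine[8])
--       FFT_BM_NEW.append(templine[9])
--
--   CHARGES.append(CHARGES_NEW)
--   NPBC_SLV.append(NPBC_SLV_NEW)
--   NPBC_VAC.append(NPBC_VAC_NEW)
--   PBC_SLV.append(PBC_SLV_NEW)
--   PBC_VAC.append(PBC_VAC_NEW)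
--   FFT_LS.append(FFT_LS_NEW)
--   FFT_BM.append(FFT_BM_NEW)
--
--
--   return CHARGES, NPBC_SLV, NPBC_VAC, PBC_SLV, PBC_VAC, FFT_LS, FFT_BM
-- ===== SOURCE B (Python) =====
-- def getpotentials(file, scheme, CHARGES, NPBC_SLV, NPBC_VAC, PBC_SLV, PBC_VAC, FFT_LS, FFT_BM):
--     # Materialize the table of token rows (up to the first empty line) once,
--     # then derive each output column by projecting the stored table.
--     rows = []
--     for line in file[1:]:
--         t = line.split()
--         if not t:
--             break
--         rows.append(t)
--     bm = (scheme == 'BM')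
--     CHARGES.append([t[3] for t in rows])
--     NPBC_SLV.append([t[4] for t in rows])
--     NPBC_VAC.append([t[5] for t in rows])
--     PBC_SLV.append([t[6] for t in rows])
--     PBC_VAC.append([t[7] for t in rows])
--     FFT_LS.append([t[8] for t in rows] if bm else [])
--     FFT_BM.append([t[9] for t in rows] if bm else [])
--     return CHARGES, NPBC_SLV, NPBC_VAC, PBC_SLV, PBC_VAC, FFT_LS, FFT_BM
-- ===== Notes on version B (the rewrite author's own statement) =====
-- stated objective: alternative
-- what changed: B first materializes the row table (token lists up to the first empty line) in one pass and then builds each output column as a projection of that stored table, instead of A's single loop that appends to seven accumulators in lockstep.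
import Mathlib
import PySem

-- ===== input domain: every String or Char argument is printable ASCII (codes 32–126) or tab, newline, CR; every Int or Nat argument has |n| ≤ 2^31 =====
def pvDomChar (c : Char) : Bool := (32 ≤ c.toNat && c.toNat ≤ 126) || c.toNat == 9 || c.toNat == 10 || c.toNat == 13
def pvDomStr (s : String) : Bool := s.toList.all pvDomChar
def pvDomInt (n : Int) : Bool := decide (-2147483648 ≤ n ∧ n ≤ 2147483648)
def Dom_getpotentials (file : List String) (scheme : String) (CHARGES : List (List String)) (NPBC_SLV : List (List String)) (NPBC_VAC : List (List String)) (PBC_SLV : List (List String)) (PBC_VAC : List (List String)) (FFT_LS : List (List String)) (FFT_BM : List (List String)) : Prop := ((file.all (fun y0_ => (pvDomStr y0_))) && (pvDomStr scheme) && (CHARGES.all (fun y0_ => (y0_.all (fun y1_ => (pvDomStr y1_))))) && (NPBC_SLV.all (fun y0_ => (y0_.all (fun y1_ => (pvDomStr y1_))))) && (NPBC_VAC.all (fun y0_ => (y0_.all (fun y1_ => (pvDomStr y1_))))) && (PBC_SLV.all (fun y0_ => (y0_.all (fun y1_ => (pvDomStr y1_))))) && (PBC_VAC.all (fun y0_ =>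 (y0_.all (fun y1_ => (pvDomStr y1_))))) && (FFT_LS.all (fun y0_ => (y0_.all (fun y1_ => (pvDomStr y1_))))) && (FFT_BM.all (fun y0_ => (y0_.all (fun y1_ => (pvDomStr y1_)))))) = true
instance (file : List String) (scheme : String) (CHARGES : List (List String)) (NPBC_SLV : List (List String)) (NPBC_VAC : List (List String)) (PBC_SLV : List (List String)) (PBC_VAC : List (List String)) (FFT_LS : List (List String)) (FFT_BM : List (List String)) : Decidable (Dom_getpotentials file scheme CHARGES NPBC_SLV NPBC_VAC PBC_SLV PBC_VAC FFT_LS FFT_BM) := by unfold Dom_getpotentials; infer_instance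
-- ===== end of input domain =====

-- ===== PORT A =====
-- B materializes the row table once and projects each column from it; A loops once appending
-- to seven accumulators. A and B also mutate the seven passed-in lists in place identically
-- (one append each); the equivalence proved here is about the return value.
def getpotentialsLoopA (scheme : String) (lines : List String)
    (c n1 n2 p1 p2 f1 f2 : List String) :
    List String × List String × List String × List String × List String × List String × List String :=
  match lines with
  | [] => (c, n1, n2, p1, p2, f1, f2)
  | line :: rest =>
    let t := PySem.Str.split₀ line
    if t.length = 0 then (c, n1, n2, p1, p2, f1, f2)
    else
      let c' := c ++ [PySem.List.pyGetD t 3 ""]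
      let n1' := n1 ++ [PySem.List.pyGetD t 4 ""]
      let n2' := n2 ++ [PySem.List.pyGetD t 5 ""]
      let p1' := p1 ++ [PySem.List.pyGetD t 6 ""]
      let p2' := p2 ++ [PySem.List.pyGetD t 7 ""]
      if scheme == "BM" then
        getpotentialsLoopA scheme rest c' n1' n2' p1' p2'
          (f1 ++ [PySem.List.pyGetD t 8 ""]) (f2 ++ [PySem.List.pyGetD t 9 ""])
      else
        getpotentialsLoopA scheme rest c' n1' n2' p1' p2' f1 f2

def getpotentials (file : List String) (scheme : String) (CHARGES : List (List String)) (NPBC_SLV : List (List String)) (NPBC_VAC : List (List String)) (PBC_SLV : List (List String)) (PBC_VAC : List (List String)) (FFT_LS : List (List String)) (FFT_BM : List (List String)) : List (List String) × List (List String) × List (List String) × List (List String) × List (List String) × List (List String) × List (List String) :=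
  match getpotentialsLoopA scheme (PySem.List.slice file (some 1) none) [] [] [] [] [] [] [] with
  | (c, n1, n2, p1, p2, f1, f2) =>
    (CHARGES ++ [c], NPBC_SLV ++ [n1], NPBC_VAC ++ [n2], PBC_SLV ++ [p1], PBC_VAC ++ [p2], FFT_LS ++ [f1], FFT_BM ++ [f2])

-- ===== PORT B =====
-- the 'rows' loop of Source B: token lists of the lines up to (not including) the first empty split
def rowsOfB : List String → List (List String)
  | [] => []
  | line :: rest =>
    let t := PySem.Str.split₀ line
    if t = [] then [] else t :: rowsOfB rest

def getpotentials_alt (file : List String) (scheme : String) (CHARGES : List (List String)) (NPBC_SLV : List (List String)) (NPBC_VAC : List (List String)) (PBC_SLV : List (List String)) (PBC_VAC : List (List String)) (FFT_LS : List (List String)) (FFT_BM : List (List String)) : List (List String) × List (List String) × List (List String) × List (List String) × List (List String) × List (List String) × List (List String) :=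
  let rows := rowsOfB (PySem.List.slice file (some 1) none)
  let bm := scheme == "BM"
  (CHARGES ++ [rows.map (fun t => PySem.List.pyGetD t 3 "")],
   NPBC_SLV ++ [rows.map (fun t => PySem.List.pyGetD t 4 "")],
   NPBC_VAC ++ [rows.map (fun t => PySem.List.pyGetD t 5 "")],
   PBC_SLV ++ [rows.map (fun t => PySem.List.pyGetD t 6 "")],
   PBC_VAC ++ [rows.map (fun t => PySem.List.pyGetD t 7 "")],
   FFT_LS ++ [if bm then rows.map (fun t => PySem.List.pyGetD t 8 "") else []],
   FFT_BM ++ [if bm then rows.map (fun t => PySem.List.pyGetD t 9 "") else []])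

-- ===== PRECONDITION & SPEC =====
-- Pre_ excludes exactly the inputs on which Python A raises IndexError: some data row before
-- the first empty line has fewer than 8 tokens (fewer than 10 when scheme == "BM").
def Pre_getpotentials (file : List String) (scheme : String) (CHARGES : List (List String)) (NPBC_SLV : List (List String)) (NPBC_VAC : List (List String)) (PBC_SLV : List (List String)) (PBC_VAC : List (List String)) (FFT_LS : List (List String)) (FFT_BM : List (List String)) : Prop :=
  ∀ t ∈ ((file.drop 1).takeWhile (fun l => PySem.Str.split₀ l ≠ [])).map PySem.Str.split₀,
    8 ≤ t.length ∧ (scheme = "BM" → 10 ≤ t.length)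
instance (file : List String) (scheme : String) (CHARGES : List (List String)) (NPBC_SLV : List (List String)) (NPBC_VAC : List (List String)) (PBC_SLV : List (List String)) (PBC_VAC : List (List String)) (FFT_LS : List (List String)) (FFT_BM : List (List String)) : Decidable (Pre_getpotentials file scheme CHARGES NPBC_SLV NPBC_VAC PBC_SLV PBC_VAC FFT_LS FFT_BM) := by unfold Pre_getpotentials; infer_instance

def pvWitness_getpotentials : List String × String × List (List String) × List (List String) × List (List String) × List (List String) × List (List String) × List (List String) × List (List String) :=
  (["header", "a b c c4 c5 c6 c7 c8"], "LS", [], [], [], [], [], [], [])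

def Spec_getpotentials (file : List String) (scheme : String) (CHARGES : List (List String)) (NPBC_SLV : List (List String)) (NPBC_VAC : List (List String)) (PBC_SLV : List (List String)) (PBC_VAC : List (List String)) (FFT_LS : List (List String)) (FFT_BM : List (List String)) (out : List (List String) × List (List String) × List (List String) × List (List String) × List (List String) × List (List String) × List (List String)) : Prop := out = getpotentials_alt file scheme CHARGES NPBC_SLV NPBC_VAC PBC_SLV PBC_VAC FFT_LS FFT_BM
instance (file : List String) (scheme : String) (CHARGES : List (List String)) (NPBC_SLV : List (List String)) (NPBC_VAC : List (List String)) (PBC_SLV : List (List String)) (PBC_VAC : List (List String)) (FFT_LS : List (List String)) (FFT_BM : List (List String)) (out : List (List String) × List (List String) × List (List String) × List (List String) × List (List String) × List (List String) × List (List String)) : Decidable (Spec_getpotentials file scheme CHARGES NPBC_SLV NPBC_VAC PBC_SLV PBC_VAC FFT_LS FFT_BM out) := by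
  unfold Spec_getpotentials
  letI i2 : DecidableEq (List (List String) × List (List String)) := instDecidableEqProd
  letI i3 : DecidableEq (List (List String) × List (List String) × List (List String)) := @instDecidableEqProd _ _ _ i2
  letI i4 : DecidableEq (List (List String) × List (List String) × List (List String) × List (List String)) := @instDecidableEqProd _ _ _ i3
  letI i5 : DecidableEq (List (List String) × List (List String) × List (List String) × List (List String) × List (List String)) := @instDecidableEqProd _ _ _ i4
  letI i6 : DecidableEq (List (List String) × List (List String) × List (List String) × List (List String) × List (List String) × List (List String)) := @instDecidableEqProd _ _ _ i5
  letI i7 : DecidableEq (List (List String) × List (List String) × List (List String) × List (List String) × List (List String) × List (List String) × List (List String)) := @instDecidableEqProd _ _ _ i6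
  exact i7 _ _

-- ===== CLAIM (what is proved, stated in full; the proofs are below) =====
def Claim_equal_getpotentials : Prop := ∀ (file : List String) (scheme : String) (CHARGES : List (List String)) (NPBC_SLV : List (List String)) (NPBC_VAC : List (List String)) (PBC_SLV : List (List String)) (PBC_VAC : List (List String)) (FFT_LS : List (List String)) (FFT_BM : List (List String)), Dom_getpotentials file scheme CHARGES NPBC_SLV NPBC_VAC PBC_SLV PBC_VAC FFT_LS FFT_BM → Pre_getpotentials file scheme CHARGES NPBC_SLV NPBC_VAC PBC_SLV PBC_VAC FFT_LS FFT_BM → Spec_getpotentials file scheme CHARGES NPBC_SLV NPBC_VAC PBC_SLV PBC_VAC FFT_LS FFT_BM (getpotentials file scheme CHARGES NPBC_SLV NPBC_VAC PBC_SLV PBC_VAC FFT_LS FFT_BM)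

-- ===== LEMMAS AND PROOFS =====
-- The accumulator loop of A computes, column by column, the projections of B's row table.
theorem loopA_eq (scheme : String) (lines : List String)
    (c n1 n2 p1 p2 f1 f2 : List String) :
    getpotentialsLoopA scheme lines c n1 n2 p1 p2 f1 f2 =
      (c ++ (rowsOfB lines).map (fun t => PySem.List.pyGetD t 3 ""),
       n1 ++ (rowsOfB lines).map (fun t => PySem.List.pyGetD t 4 ""),
       n2 ++ (rowsOfB lines).map (fun t => PySem.List.pyGetD t 5 ""),
       p1 ++ (rowsOfB lines).map (fun t => PySem.List.pyGetD t 6 ""),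
       p2 ++ (rowsOfB lines).map (fun t => PySem.List.pyGetD t 7 ""),
       f1 ++ (if scheme == "BM" then (rowsOfB lines).map (fun t => PySem.List.pyGetD t 8 "") else []),
       f2 ++ (if scheme == "BM" then (rowsOfB lines).map (fun t => PySem.List.pyGetD t 9 "") else [])) := by
  induction lines generalizing c n1 n2 p1 p2 f1 f2 with
  | nil => simp [getpotentialsLoopA, rowsOfB]
  | cons line rest ih =>
    simp only [getpotentialsLoopA, rowsOfB]
    by_cases ht : PySem.Str.split₀ line = []
    · simp [ht]
    · have hlen : ¬ (PySem.Str.split₀ line).length = 0 := by simp [ht]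
      by_cases hbm : scheme == "BM"
      · simp [ht, hlen, hbm, ih]
      · simp [ht, hlen, hbm, ih]

-- ===== VERDICT (by name: the statement is the Claim_ definition above) =====
theorem getpotentials_spec : Claim_equal_getpotentials := by
  intro file scheme CHARGES NPBC_SLV NPBC_VAC PBC_SLV PBC_VAC FFT_LS FFT_BM _ _
  show _ = _
  simp only [getpotentials, getpotentials_alt, loopA_eq, List.nil_append]
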